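-- pv_equiv track=rewrite | github.com/jsheng0901/leetcode | Array/2055.py | get_right
-- ===== SOURCE A (Python) =====
-- def get_right(s):
--     # 找到每个plate的最右边的candle index
--     # 同理找左边的 index，只是需要反向遍历
--     right_index = [-1] * len(s)
--     right = -1
--     for i in range(len(s) - 1, -1, -1):
--         if s[i] == "*":
--             right_index[i] = right
--         elif s[i] == "|":
--             right = i
--             right_index[i] = i
--
--     return right_index
-- ===== SOURCE B (Python) =====
-- def get_right(s):
--     # prebuilt sorted candle-position index + one forward pass with a pointer,
--     # instead of A's backward scan with running state
--     candles = [i for i, c in enumerate(s) if c == '|']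
--     res = []
--     k = 0
--     for i, c in enumerate(s):
--         while k < len(candles) and candles[k] < i:
--             k += 1
--         if (c == '*' or c == '|') and k < len(candles):
--             res.append(candles[k])
--         else:
--             res.append(-1)
--     return res
-- ===== Notes on version B (the rewrite author's own statement) =====
-- stated objective: alternative
-- what changed: Replaces the backward scan that carries a running nearest-candle index by prebuilding the sorted list of candle positions and doing a single forward pass with a monotone pointer into that list (same O(n) cost, different data structure and traversal order).
import Mathlib
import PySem

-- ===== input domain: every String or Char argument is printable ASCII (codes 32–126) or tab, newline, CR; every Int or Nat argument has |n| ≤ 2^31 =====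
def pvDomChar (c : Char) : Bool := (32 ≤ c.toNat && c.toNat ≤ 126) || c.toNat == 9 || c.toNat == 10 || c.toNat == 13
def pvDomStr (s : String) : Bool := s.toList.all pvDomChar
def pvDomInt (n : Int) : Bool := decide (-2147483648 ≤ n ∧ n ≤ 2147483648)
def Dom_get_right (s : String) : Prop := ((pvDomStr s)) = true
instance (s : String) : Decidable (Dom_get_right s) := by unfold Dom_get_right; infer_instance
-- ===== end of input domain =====

-- B replaces A's backward scan with running state by a prebuilt candle-position index
-- plus a single forward pass with a pointer (alternative decomposition, same O(n) cost).

-- ===== PORT A =====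
-- loop body of A's backward for-loop (state: (right_index, right))
def stepA (l : List Char) (st : List Int × Int) (i : Int) : List Int × Int :=
  let c := PySem.List.pyGetD l i ' '
  if c = '*' then (PySem.List.pySetD st.1 i st.2, st.2)
  else if c = '|' then (PySem.List.pySetD st.1 i i, i)
  else st

def get_right (s : String) : List Int :=
  let l := s.toList
  let n := l.length
  ((PySem.List.pyRange ((n : Int) - 1) (-1) (-1)).foldl (stepA l) (List.replicate n (-1), -1)).1

-- ===== PORT B =====
-- candles = [i for i, c in enumerate(s) if c == '|']  (general start m for the proofs)
def candlesOf (t : List Char) (m : Int) : List Int :=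
  ((PySem.List.enumerate t m).filter (fun p => p.2 == '|')).map (fun p => p.1)

-- the inner while loop: advance k while k < len(candles) and candles[k] < i
def grAdvance (cs : List Int) (k : Nat) (i : Int) : Nat :=
  if h : k < cs.length then
    if cs.getD k 0 < i then grAdvance cs (k + 1) i else k
  else k
termination_by cs.length - k

-- loop body of B's forward pass (state: (res, k))
def stepB (cs : List Int) (st : List Int × Nat) (p : Int × Char) : List Int × Nat :=
  let k := grAdvance cs st.2 p.1
  if (p.2 = '*' ∨ p.2 = '|') ∧ k < cs.length then (st.1 ++ [cs.getD k (-1)], k)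
  else (st.1 ++ [(-1 : Int)], k)

def get_right_alt (s : String) : List Int :=
  let l := s.toList
  let cs := candlesOf l 0
  ((PySem.List.enumerate l 0).foldl (stepB cs) ([], 0)).1

-- ===== PRECONDITION & SPEC =====
def Spec_get_right (s : String) (out : List Int) : Prop := out = get_right_alt s
instance (s : String) (out : List Int) : Decidable (Spec_get_right s out) := by unfold Spec_get_right; infer_instance

-- ===== CLAIM (what is proved, stated in full; the proofs are below) =====
def Claim_equal_get_right : Prop := ∀ (s : String), Dom_get_right s → Spec_get_right s (get_right s)

-- ===== LEMMAS AND PROOFS =====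

-- reference: index of the first '|' in t, positions counted from m (-1 if none)
def refNext (t : List Char) (m : Int) : Int :=
  match t with
  | [] => -1
  | c :: t' => if c = '|' then m else refNext t' (m + 1)

-- reference output for the suffix t of the string, positions counted from m
def refOut (t : List Char) (m : Int) : List Int :=
  match t with
  | [] => []
  | c :: t' =>
    (if c = '|' then m else if c = '*' then refNext t' (m + 1) else -1) :: refOut t' (m + 1)

theorem candlesOf_nil (m : Int) : candlesOf [] m = [] := by
  simp [candlesOf, PySem.List.enumerate_nil]

theorem candlesOf_cons (c : Char) (t : List Char) (m : Int) :
    candlesOf (c :: t) m = if c = '|' then m :: candlesOf t (m + 1) else candlesOf t (m + 1) := by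
  simp only [candlesOf, PySem.List.enumerate_cons, List.filter_cons]
  by_cases h : c = '|' <;> simp [h]

theorem mem_candlesOf {t : List Char} {m x : Int} (hx : x ∈ candlesOf t m) : m ≤ x := by
  induction t generalizing m with
  | nil => simp [candlesOf_nil] at hx
  | cons c t' ih =>
    rw [candlesOf_cons] at hx
    split at hx
    · rcases List.mem_cons.1 hx with h | h
      · omega
      · have := ih h; omega
    · have := ih hx; omega

theorem refNext_eq_getD (t : List Char) (m : Int) :
    refNext t m = (candlesOf t m).getD 0 (-1) := by
  induction t generalizing m with
  | nil => simp [refNext, candlesOf_nil]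
  | cons c t' ih =>
    rw [candlesOf_cons]
    by_cases h : c = '|' <;> simp [refNext, h, ih]

-- grAdvance stops exactly at the boundary between candles < i and candles ≥ i
theorem grAdvance_eq (pre suf : List Int) (k : Nat) (i : Int)
    (hk : k ≤ pre.length) (hpre : ∀ x ∈ pre, x < i) (hsuf : ∀ x ∈ suf, i ≤ x) :
    grAdvance (pre ++ suf) k i = pre.length := by
  have main : ∀ d k, k ≤ pre.length → pre.length - k = d → grAdvance (pre ++ suf) k i = pre.length := by
    intro d
    induction d with
    | zero =>
      intro k hk hd
      have hke : k = pre.length := by omega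
      subst hke
      rw [grAdvance]
      split
      · next hlt =>
        have hs : suf ≠ [] := by
          intro h; subst h; simp at hlt
        have hget : (pre ++ suf).getD pre.length 0 = suf.getD 0 0 := by
          simp [List.getD, List.getElem?_append_right]
        rw [hget]
        have hmem : suf.getD 0 0 ∈ suf := by
          cases suf with
          | nil => exact absurd rfl hs
          | cons a l => simp [List.getD]
        have := hsuf _ hmem
        rw [if_neg (by omega)]
      · rfl
    | succ d ih =>
      intro k hk hd
      have hklt : k < pre.length := by omega
      rw [grAdvance]
      rw [dif_pos (by simp; omega)]
      have hget : (pre ++ suf).getD k 0 = pre[k] := by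
        simp [List.getD, List.getElem?_append_left hklt, List.getElem?_eq_getElem hklt]
      rw [hget, if_pos (hpre _ (List.getElem_mem hklt))]
      exact ih (k + 1) (by omega) (by omega)
  exact main (pre.length - k) k hk rfl

-- B's forward loop computes refOut
theorem B_loop (candles : List Int) (t : List Char) (m : Int) (acc : List Int) (k : Nat)
    (pre : List Int) (hsplit : candles = pre ++ candlesOf t m)
    (hk : k ≤ pre.length) (hpre : ∀ x ∈ pre, x < m) :
    ((PySem.List.enumerate t m).foldl (stepB candles) (acc, k)).1
      = acc ++ refOut t m := by
  induction t generalizing m acc k pre with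
  | nil => simp [PySem.List.enumerate_nil, refOut]
  | cons c t' ih =>
    rw [PySem.List.enumerate_cons, List.foldl_cons]
    rw [candlesOf_cons] at hsplit
    have hsufge : ∀ x ∈ candlesOf t' (m + 1), m ≤ x := by
      intro x hx
      have := mem_candlesOf hx; omega
    by_cases hc : c = '|'
    · rw [if_pos hc] at hsplit
      have hadv : grAdvance candles k m = pre.length := by
        rw [hsplit]
        refine grAdvance_eq _ _ _ _ hk hpre ?_
        intro x hx
        rcases List.mem_cons.1 hx with h | h
        · omega
        · exact hsufge _ h
      have hstep : stepB candles (acc, k) (m, c) = (acc ++ [m], pre.length) := by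
        unfold stepB
        simp only [hadv]
        rw [if_pos ⟨Or.inr hc, by rw [hsplit]; simp⟩]
        have hgd : candles.getD pre.length (-1) = m := by
          rw [hsplit, List.getD, List.getElem?_append_right (le_refl pre.length)]
          simp
        rw [hgd]
      rw [hstep]
      rw [ih (m + 1) (acc ++ [m]) pre.length (pre ++ [m])
            (by rw [hsplit]; simp) (by simp)
            (by intro x hx
                rcases List.mem_append.1 hx with h | h
                · have := hpre _ h; omega
                · simp at h; omega)]
      simp [refOut, hc]
    · rw [if_neg hc] at hsplit
      have hadv : grAdvance candles k m = pre.length := by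
        rw [hsplit]
        exact grAdvance_eq _ _ _ _ hk hpre hsufge
      have hstep : stepB candles (acc, k)
          (m, c) = (acc ++ [if c = '*' then refNext t' (m + 1) else -1], pre.length) := by
        unfold stepB
        simp only [hadv]
        by_cases hs : c = '*'
        · rcases hrest : candlesOf t' (m + 1) with _ | ⟨a, rest⟩
          · rw [if_neg (by rw [hsplit, hrest]; simp)]
            rw [refNext_eq_getD, hrest]
            simp [hs, List.getD]
          · rw [if_pos ⟨Or.inl hs, by rw [hsplit, hrest]; simp⟩]
            rw [refNext_eq_getD, hrest]
            have hgd : candles.getD pre.length (-1) = a := by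
              rw [hsplit, hrest, List.getD, List.getElem?_append_right (le_refl pre.length)]
              simp
            rw [hgd]
            simp [hs, List.getD]
        · rw [if_neg (by rintro ⟨h | h, -⟩ <;> [exact hs h; exact hc h])]
          simp [hs]
      rw [hstep]
      rw [ih (m + 1) _ pre.length pre hsplit (le_refl _)
            (by intro x hx; have := hpre _ hx; omega)]
      simp [refOut, hc]

-- A's backward loop: after processing indices j-1 … 0 starting from the state for the
-- suffix l.drop j, the final state is the full reference output
theorem A_loop (l : List Char) (j : Nat) (hj : j ≤ l.length) :
    (PySem.List.pyRange ((j : Int) - 1) (-1) (-1)).foldl (stepA l)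
        (List.replicate j (-1) ++ refOut (l.drop j) j, refNext (l.drop j) j)
      = (refOut l 0, refNext l 0) := by
  induction j with
  | zero =>
    rw [PySem.List.pyRange_neg_one_eq_nil (by omega)]
    simp
  | succ j ih =>
    have hjl : j < l.length := by omega
    rw [show ((((j : Nat) + 1 : Nat)) : Int) - 1 = (j : Int) by push_cast; omega]
    rw [PySem.List.pyRange_neg_one_cons (by omega), List.foldl_cons]
    have hdrop : l[j] :: l.drop (j + 1) = l.drop j := List.getElem_cons_drop hjl
    have hset : ∀ (v : Int) (R : List Int),
        (List.replicate (j + 1) (-1 : Int) ++ R).set j v = List.replicate j (-1) ++ v :: R := by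
      intro v R
      rw [List.replicate_succ', List.append_assoc, List.set_append]
      simp
    have hstep : stepA l
        (List.replicate (j + 1) (-1) ++ refOut (l.drop (j + 1)) ((j : Nat) + 1 : Nat),
          refNext (l.drop (j + 1)) ((j : Nat) + 1 : Nat)) (j : Int)
        = (List.replicate j (-1) ++ refOut (l.drop j) j, refNext (l.drop j) j) := by
      unfold stepA
      have hc : PySem.List.pyGetD l (j : Int) ' ' = l[j] := by
        simp [PySem.List.pyGetD_natCast, List.getD_eq_getElem?_getD, List.getElem?_eq_getElem hjl]
      rw [hc]
      rw [← hdrop]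
      by_cases h1 : l[j] = '*'
      · rw [if_pos h1]
        simp only [PySem.List.pySetD_natCast, hset]
        simp [refOut, refNext, h1]
      · rw [if_neg h1]
        by_cases h2 : l[j] = '|'
        · rw [if_pos h2]
          simp only [PySem.List.pySetD_natCast, hset]
          simp [refOut, refNext, h2]
        · rw [if_neg h2]
          simp only [refOut, refNext, if_neg h1, if_neg h2]
          rw [List.replicate_succ', List.append_assoc]
          push_cast
          constructor
    rw [hstep]
    exact ih (by omega)

-- ===== VERDICT (by name: the statement is the Claim_ definition above) =====
theorem get_right_spec : Claim_equal_get_right := by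
  intro s _
  unfold Spec_get_right get_right get_right_alt
  dsimp only
  have hA := A_loop s.toList s.toList.length (le_refl _)
  simp only [List.drop_length, refOut, refNext, List.append_nil] at hA
  rw [hA]
  have hB := B_loop (candlesOf s.toList 0) s.toList 0 [] 0 []
      (by simp) (by simp) (by simp)
  rw [hB]
  simp
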